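-- pv_equiv track=rewrite | github.com/marianesc/Prog-1--2019.2 | Unidade9/somaLinhaColuna/somaLinhaColuna.py | soma_linha_e_coluna
-- ===== SOURCE A (Python) =====
-- def soma_linha_e_coluna(m, l, c):
--     soma = 0
--     for i in range(len(m)):
--         for j in range(len(m[0])):
--             if i == l and j == c: continue
--
--             if i == l: soma += m[i][j]
--             elif j == c: soma += m[i][j]
--
--     return soma
-- ===== SOURCE B (Python) =====
-- def soma_linha_e_coluna(m, l, c):
--     # Sum of row l and column c, excluding the intersection cell.
--     # Touches only the relevant row and column: O(R + C) instead of O(R * C).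
--     if not m:
--         return 0
--     ncols = len(m[0])
--     soma = 0
--     if 0 <= l < len(m):
--         soma += sum(m[l][j] for j in range(ncols) if j != c)
--     if 0 <= c < ncols:
--         soma += sum(m[i][c] for i in range(len(m)) if i != l)
--     return soma
-- ===== Notes on version B (the rewrite author's own statement) =====
-- stated objective: faster
-- what changed: Instead of scanning every cell of the matrix and testing i==l / j==c, B directly sums the entries of row l (skipping column c) and of column c (skipping row l), guarded by range checks.
import Mathlib
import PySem

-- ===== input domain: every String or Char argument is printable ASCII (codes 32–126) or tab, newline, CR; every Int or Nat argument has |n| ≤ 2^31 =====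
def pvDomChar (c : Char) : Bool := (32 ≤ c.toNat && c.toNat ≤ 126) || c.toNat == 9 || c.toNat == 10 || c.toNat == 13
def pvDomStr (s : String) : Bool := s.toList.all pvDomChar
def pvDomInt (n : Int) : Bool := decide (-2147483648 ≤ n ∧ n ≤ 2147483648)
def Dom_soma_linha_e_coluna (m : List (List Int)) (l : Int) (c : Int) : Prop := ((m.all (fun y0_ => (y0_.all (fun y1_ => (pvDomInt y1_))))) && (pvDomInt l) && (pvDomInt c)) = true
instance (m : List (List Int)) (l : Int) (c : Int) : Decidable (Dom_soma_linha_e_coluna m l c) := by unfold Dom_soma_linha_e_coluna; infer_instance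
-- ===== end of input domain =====

-- B sums only row l (skipping column c) and column c (skipping row l): O(R+C) vs A's full O(R*C) scan.

-- ===== PORT A =====
def soma_linha_e_coluna (m : List (List Int)) (l : Int) (c : Int) : Int :=
  (PySem.List.pyRange 0 (m.length : Int) 1).foldl (fun soma i =>
    (PySem.List.pyRange 0 ((PySem.List.pyGetD m 0 []).length : Int) 1).foldl (fun soma j =>
      if i = l ∧ j = c then soma
      else if i = l then soma + PySem.List.pyGetD (PySem.List.pyGetD m i []) j 0
      else if j = c then soma + PySem.List.pyGetD (PySem.List.pyGetD m i []) j 0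
      else soma) soma) 0

-- ===== PORT B =====
def soma_linha_e_coluna_alt (m : List (List Int)) (l : Int) (c : Int) : Int :=
  if m = [] then 0
  else
    (if 0 ≤ l ∧ l < (m.length : Int) then
      (((PySem.List.pyRange 0 ((PySem.List.pyGetD m 0 []).length : Int) 1).filter (fun j => j ≠ c)).map
        (fun j => PySem.List.pyGetD (PySem.List.pyGetD m l []) j 0)).sum
    else 0)
    +
    (if 0 ≤ c ∧ c < ((PySem.List.pyGetD m 0 []).length : Int) then
      (((PySem.List.pyRange 0 (m.length : Int) 1).filter (fun i => i ≠ l)).map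
        (fun i => PySem.List.pyGetD (PySem.List.pyGetD m i []) c 0)).sum
    else 0)

-- ===== PRECONDITION & SPEC =====
-- Pre_ excludes exactly the ragged matrices on which Python A raises IndexError
-- (a visited cell m[i][j] missing because row i is shorter than row 0); B raises there too.
def Pre_soma_linha_e_coluna (m : List (List Int)) (l : Int) (c : Int) : Prop :=
  ((0 ≤ l ∧ l < (m.length : Int)) →
    ∀ j : Nat, j < (m.headD []).length → (j : Int) ≠ c → j < (m.getD l.toNat []).length) ∧
  ((0 ≤ c ∧ c < ((m.headD []).length : Int)) →
    ∀ i : Nat, i < m.length → (i : Int) ≠ l → c.toNat < (m.getD i []).length)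
instance (m : List (List Int)) (l : Int) (c : Int) : Decidable (Pre_soma_linha_e_coluna m l c) := by
  unfold Pre_soma_linha_e_coluna; infer_instance
def pvWitness_soma_linha_e_coluna : List (List Int) × Int × Int := ([[1, 2], [3, 4]], 0, 1)
def Spec_soma_linha_e_coluna (m : List (List Int)) (l : Int) (c : Int) (out : Int) : Prop := out = soma_linha_e_coluna_alt m l c
instance (m : List (List Int)) (l : Int) (c : Int) (out : Int) : Decidable (Spec_soma_linha_e_coluna m l c out) := by unfold Spec_soma_linha_e_coluna; infer_instance

-- ===== CLAIM (what is proved, stated in full; the proofs are below) =====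
def Claim_equal_soma_linha_e_coluna : Prop := ∀ (m : List (List Int)) (l : Int) (c : Int), Dom_soma_linha_e_coluna m l c → Pre_soma_linha_e_coluna m l c → Spec_soma_linha_e_coluna m l c (soma_linha_e_coluna m l c)

-- ===== LEMMAS AND PROOFS =====

-- m[i][j] read with default 0 (both ports index the same cells, in range under Pre_).
def pvA (m : List (List Int)) (i j : Int) : Int :=
  PySem.List.pyGetD (PySem.List.pyGetD m i []) j 0

-- the per-cell contribution in A's double loop
def pvG (m : List (List Int)) (l c i j : Int) : Int :=
  if i = l ∧ j = c then 0
  else if i = l then pvA m i j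
  else if j = c then pvA m i j
  else 0

lemma pv_foldl_sum (body : Int → Int → Int) (g : Int → Int)
    (hb : ∀ s x, body s x = s + g x) :
    ∀ (L : List Int) (s : Int), L.foldl body s = s + (L.map g).sum := by
  intro L
  induction L with
  | nil => intro s; simp
  | cons x xs ih =>
    intro s
    simp only [List.foldl_cons, List.map_cons, List.sum_cons, hb, ih]
    ring

lemma pv_sum_filter_ne (h : Int → Int) (l : Int) (L : List Int) :
    ((L.filter (fun x => x ≠ l)).map h).sum
      = (L.map (fun x => if x = l then 0 else h x)).sum := by
  induction L with
  | nil => simp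
  | cons x xs ih =>
    rcases eq_or_ne x l with hx | hx
    · rw [List.filter_cons, if_neg (by simp [hx]), List.map_cons, List.sum_cons, if_pos hx, ih,
        zero_add]
    · rw [List.filter_cons, if_pos (by simp [hx]), List.map_cons, List.map_cons, List.sum_cons,
        List.sum_cons, if_neg hx, ih]

lemma pv_sum_map_extract (L : List Int) (hN : L.Nodup) (l : Int) (P Q : Int → Int) :
    (L.map (fun x => if x = l then P x else Q x)).sum
      = (if l ∈ L then P l else 0) + (L.map (fun x => if x = l then 0 else Q x)).sum := by
  induction L with
  | nil => simp
  | cons x xs ih =>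
    have hN' : xs.Nodup := (List.nodup_cons.mp hN).2
    by_cases hx : x = l
    · subst hx
      have hnotin : x ∉ xs := (List.nodup_cons.mp hN).1
      have hcongr : ∀ f : Int → Int, xs.map (fun y => if y = x then f y else Q y)
          = xs.map (fun y => if y = x then 0 else Q y) := by
        intro f
        refine List.map_congr_left (fun y hy => ?_)
        have : y ≠ x := fun h => hnotin (h ▸ hy)
        simp [this]
      simp only [List.map_cons, List.sum_cons, List.mem_cons, true_or, if_true]
      rw [hcongr P]
      ring
    · have hmem : (l ∈ x :: xs) ↔ (l ∈ xs) := by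
        rw [List.mem_cons]; exact or_iff_right (fun h => hx h.symm)
      simp only [List.map_cons, List.sum_cons, if_neg hx, ih hN', hmem]
      ring

theorem pv_main (m : List (List Int)) (l c : Int) :
    soma_linha_e_coluna m l c = soma_linha_e_coluna_alt m l c := by
  by_cases hm : m = []
  · subst hm
    simp [soma_linha_e_coluna, soma_linha_e_coluna_alt,
      PySem.List.pyRange_one_eq_nil (le_refl (0 : Int))]
  · set C : Int := ((PySem.List.pyGetD m 0 []).length : Int) with hC
    set R : Int := (m.length : Int) with hR
    -- inner loop of A as a sum
    have hinner : ∀ (i : Int) (s : Int),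
        (PySem.List.pyRange 0 C 1).foldl (fun soma j =>
          if i = l ∧ j = c then soma
          else if i = l then soma + pvA m i j
          else if j = c then soma + pvA m i j
          else soma) s
        = s + ((PySem.List.pyRange 0 C 1).map (pvG m l c i)).sum := by
      intro i s
      refine pv_foldl_sum _ (pvG m l c i) ?_ _ s
      intro s j
      simp only [pvG]
      split_ifs <;> ring
    have hA : soma_linha_e_coluna m l c
        = ((PySem.List.pyRange 0 R 1).map
            (fun i => ((PySem.List.pyRange 0 C 1).map (pvG m l c i)).sum)).sum := by
      have := pv_foldl_sum
        (fun soma i => (PySem.List.pyRange 0 C 1).foldl (fun soma j =>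
          if i = l ∧ j = c then soma
          else if i = l then soma + pvA m i j
          else if j = c then soma + pvA m i j
          else soma) soma)
        (fun i => ((PySem.List.pyRange 0 C 1).map (pvG m l c i)).sum)
        (fun s i => hinner i s) (PySem.List.pyRange 0 R 1) 0
      simpa [soma_linha_e_coluna, pvA] using this
    -- characterise the inner sum
    have hrow : ((PySem.List.pyRange 0 C 1).map (pvG m l c l)).sum
        = ((PySem.List.pyRange 0 C 1).map (fun j => if j = c then 0 else pvA m l j)).sum := by
      congr 1
      refine List.map_congr_left (fun j _ => ?_)
      simp only [pvG]
      split_ifs with h1 h2 h3 <;> simp_all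
    have hcol : ∀ i : Int, i ≠ l →
        ((PySem.List.pyRange 0 C 1).map (pvG m l c i)).sum
          = (if 0 ≤ c ∧ c < C then pvA m i c else 0) := by
      intro i hi
      have h1 : ((PySem.List.pyRange 0 C 1).map (pvG m l c i)).sum
          = ((PySem.List.pyRange 0 C 1).map (fun j => if j = c then pvA m i j else 0)).sum := by
        congr 1
        refine List.map_congr_left (fun j _ => ?_)
        simp only [pvG]
        split_ifs with h1 h2 h3 <;> simp_all
      rw [h1, pv_sum_map_extract _ (PySem.List.nodup_pyRange_one 0 C) c]
      simp [PySem.List.mem_pyRange_one]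
    -- inner sum = ite on i = l
    have hsplit : ∀ i : Int,
        ((PySem.List.pyRange 0 C 1).map (pvG m l c i)).sum
          = if i = l
            then ((PySem.List.pyRange 0 C 1).map (fun j => if j = c then 0 else pvA m l j)).sum
            else (if 0 ≤ c ∧ c < C then pvA m i c else 0) := by
      intro i
      by_cases hi : i = l
      · subst hi; simp [hrow]
      · simp [hi, hcol i hi]
    have hAsum : soma_linha_e_coluna m l c
        = (if l ∈ PySem.List.pyRange 0 R 1
            then ((PySem.List.pyRange 0 C 1).map (fun j => if j = c then 0 else pvA m l j)).sum
            else 0)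
          + ((PySem.List.pyRange 0 R 1).map
              (fun i => if i = l then 0 else (if 0 ≤ c ∧ c < C then pvA m i c else 0))).sum := by
      rw [hA]
      have : ((PySem.List.pyRange 0 R 1).map
            (fun i => ((PySem.List.pyRange 0 C 1).map (pvG m l c i)).sum)).sum
          = ((PySem.List.pyRange 0 R 1).map
            (fun i => if i = l
              then ((PySem.List.pyRange 0 C 1).map (fun j => if j = c then 0 else pvA m l j)).sum
              else (if 0 ≤ c ∧ c < C then pvA m i c else 0))).sum := by
        congr 1
        exact List.map_congr_left (fun i _ => hsplit i)
      rw [this, pv_sum_map_extract _ (PySem.List.nodup_pyRange_one 0 R) l]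
    -- B as the same two sums
    rw [hAsum]
    simp only [soma_linha_e_coluna_alt, if_neg hm, PySem.List.mem_pyRange_one]
    have hs1 : (((PySem.List.pyRange 0 C 1).filter (fun j => j ≠ c)).map
          (fun j => PySem.List.pyGetD (PySem.List.pyGetD m l []) j 0)).sum
        = ((PySem.List.pyRange 0 C 1).map (fun j => if j = c then 0 else pvA m l j)).sum := by
      rw [pv_sum_filter_ne]
      rfl
    have hs2 : (((PySem.List.pyRange 0 R 1).filter (fun i => i ≠ l)).map
          (fun i => PySem.List.pyGetD (PySem.List.pyGetD m i []) c 0)).sum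
        = ((PySem.List.pyRange 0 R 1).map (fun i => if i = l then 0 else pvA m i c)).sum := by
      rw [pv_sum_filter_ne]
      rfl
    rw [hs1, hs2, ← hR, ← hC]
    congr 1
    by_cases hc : 0 ≤ c ∧ c < C
    · simp [hc]
    · simp [hc]

-- ===== VERDICT (by name: the statement is the Claim_ definition above) =====
theorem soma_linha_e_coluna_spec : Claim_equal_soma_linha_e_coluna := by
  intro m l c _ _
  unfold Spec_soma_linha_e_coluna
  exact pv_main m l c
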